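-- pv_equiv track=rewrite | github.com/xcsp3team/pycsp3 | tools/inspector.py | browse_code_bottom_to_top
-- ===== SOURCE A (Python) =====
-- def is_comment_line(line):
--     if not isinstance(line, str):
--         return False
--     line = line.strip()
--     return len(line) > 2 and line[0] == '#' and line.replace(" ", "")[1] != '!'
--
-- def is_empty_line(line):
--     return isinstance(line, str) and len(line.strip()) == 0
--
-- def is_continued_line(line):
--     return isinstance(line, str) and line.strip().endswith('\\')
--
-- def browse_code_bottom_to_top(lines, function_name):
--     code = []
--     function_name_found = False
--     for line in lines:
--         if function_name_found is False:
--             code.append(line)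
--             if function_name in line and not is_comment_line(line):
--                 function_name_found = True
--         else:
--             if is_continued_line(line) or is_empty_line(line) or is_comment_line(line):
--                 code.append(line)
--             else:
--                 break
--     return code
-- ===== SOURCE B (Python) =====
-- def is_comment_line(line):
--     if not isinstance(line, str):
--         return False
--     line = line.strip()
--     return len(line) > 2 and line[0] == '#' and line.replace(" ", "")[1] != '!'
--
-- def is_empty_line(line):
--     return isinstance(line, str) and len(line.strip()) == 0
--
-- def is_continued_line(line):
--     return isinstance(line, str) and line.strip().endswith('\\')
--
-- def _is_trailer(line):
--     return is_continued_line(line) or is_empty_line(line) or is_comment_line(line)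
--
-- def browse_code_bottom_to_top(lines, function_name):
--     idx = next((i for i, l in enumerate(lines)
--                 if function_name in l and not is_comment_line(l)), None)
--     if idx is None:
--         return list(lines)
--     end = idx + 1
--     while end < len(lines) and _is_trailer(lines[end]):
--         end += 1
--     return lines[:end]
-- ===== Notes on version B (the rewrite author's own statement) =====
-- stated objective: alternative
-- what changed: Replaces the flag-driven single state machine by a locate-boundary pass (index of the first non-comment line containing the name) plus an index-advancing extension over trailing continuation/empty/comment lines, returning one slice.
import Mathlib
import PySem

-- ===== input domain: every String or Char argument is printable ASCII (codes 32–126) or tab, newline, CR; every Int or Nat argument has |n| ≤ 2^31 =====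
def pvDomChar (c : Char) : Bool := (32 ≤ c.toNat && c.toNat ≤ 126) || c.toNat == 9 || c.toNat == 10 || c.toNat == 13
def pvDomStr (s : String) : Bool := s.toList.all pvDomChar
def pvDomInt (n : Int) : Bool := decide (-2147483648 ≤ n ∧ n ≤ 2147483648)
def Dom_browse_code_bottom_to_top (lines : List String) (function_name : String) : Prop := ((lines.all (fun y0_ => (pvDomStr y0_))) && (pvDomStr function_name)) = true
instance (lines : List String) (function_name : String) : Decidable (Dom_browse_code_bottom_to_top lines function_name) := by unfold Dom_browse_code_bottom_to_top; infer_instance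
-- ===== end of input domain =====

-- B replaces A's flag-driven state machine by a find-boundary pass plus an index-advancing
-- extension over trailing lines and one slice (objective: alternative decomposition, same cost).

-- ===== PORT A =====
-- Shared helpers (identical in both Python files; the inputs are always str, so the
-- isinstance checks are True). In is_comment_line the two indexings are guarded by
-- len > 2 (the stripped string has ≥ 2 non-space chars), so Python never raises there;
-- the `none` branches below are unreachable.
def isCommentLine (line : String) : Bool :=
  let s := PySem.Str.strip line
  if PySem.Str.len s > 2 then
    (match PySem.Str.pyGet? s 0 with | some c => c == '#' | none => false) &&
    (match PySem.Str.pyGet? (PySem.Str.replace s " " "") 1 with | some c => c != '!' | none => false)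
  else false

def isEmptyLine (line : String) : Bool :=
  PySem.Str.len (PySem.Str.strip line) == 0

def isContinuedLine (line : String) : Bool :=
  PySem.Str.endswith (PySem.Str.strip line) "\\"

-- A's for-loop with the function_name_found flag; `break` = stop recursing.
def browseLoopA (function_name : String) : List String → Bool → List String
  | [], _ => []
  | l :: ls, false =>
      l :: browseLoopA function_name ls (PySem.Str.isIn function_name l && !isCommentLine l)
  | l :: ls, true =>
      if isContinuedLine l || isEmptyLine l || isCommentLine l then
        l :: browseLoopA function_name ls true
      else
        []

def browse_code_bottom_to_top (lines : List String) (function_name : String) : List String :=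
  browseLoopA function_name lines false

-- ===== PORT B =====
def isTrailer (line : String) : Bool :=
  isContinuedLine line || isEmptyLine line || isCommentLine line

-- B's while-loop advancing `end` past trailing continuation/empty/comment lines.
def bExtend (lines : List String) (e : Nat) : Nat :=
  if h : e < lines.length then
    if isTrailer lines[e] then bExtend lines (e + 1) else e
  else e
termination_by lines.length - e

def browse_code_bottom_to_top_alt (lines : List String) (function_name : String) : List String :=
  match lines.findIdx? (fun l => PySem.Str.isIn function_name l && !isCommentLine l) with
  | none => lines
  | some idx => lines.take (bExtend lines (idx + 1))

-- ===== PRECONDITION & SPEC =====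
def Spec_browse_code_bottom_to_top (lines : List String) (function_name : String) (out : List String) : Prop := out = browse_code_bottom_to_top_alt lines function_name
instance (lines : List String) (function_name : String) (out : List String) : Decidable (Spec_browse_code_bottom_to_top lines function_name out) := by unfold Spec_browse_code_bottom_to_top; infer_instance

-- ===== CLAIM (what is proved, stated in full; the proofs are below) =====
def Claim_equal_browse_code_bottom_to_top : Prop := ∀ (lines : List String) (function_name : String), Dom_browse_code_bottom_to_top lines function_name → Spec_browse_code_bottom_to_top lines function_name (browse_code_bottom_to_top lines function_name)

-- ===== LEMMAS AND PROOFS =====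

-- (not found in Mathlib by exact?) taking takeWhile-many elements gives the takeWhile
theorem take_length_takeWhile (l : List String) (p : String → Bool) :
    l.take (l.takeWhile p).length = l.takeWhile p := by
  induction l with
  | nil => rfl
  | cons a l ih =>
      by_cases h : p a
      · simp [List.takeWhile_cons_of_pos h, ih]
      · simp [List.takeWhile_cons_of_neg h]

-- After the flag is set, A's loop is exactly takeWhile on the trailer predicate.
theorem browseLoopA_true (fn : String) (ls : List String) :
    browseLoopA fn ls true = ls.takeWhile isTrailer := by
  induction ls with
  | nil => rfl
  | cons l ls ih =>
      simp only [browseLoopA, List.takeWhile_cons, isTrailer]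
      split <;> simp_all

-- B's while-loop computes e plus the length of the trailer-takeWhile of the rest.
theorem bExtend_eq (lines : List String) (e : Nat) :
    bExtend lines e = e + ((lines.drop e).takeWhile isTrailer).length := by
  by_cases h : e < lines.length
  · rw [bExtend]
    have hd : lines.drop e = lines[e] :: lines.drop (e + 1) :=
      List.drop_eq_getElem_cons h
    by_cases ht : isTrailer lines[e]
    · rw [dif_pos h, if_pos ht, bExtend_eq lines (e + 1), hd,
        List.takeWhile_cons_of_pos ht]
      simp; omega
    · rw [dif_pos h, if_neg ht, hd, List.takeWhile_cons_of_neg ht]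
      simp
  · rw [bExtend, dif_neg h]
    rw [List.drop_eq_nil_of_le (by omega)]
    simp
termination_by lines.length - e

-- Taking up to the extended boundary = the prefix plus the trailer-takeWhile of the rest.
theorem take_bExtend (lines : List String) (e : Nat) :
    lines.take (bExtend lines e) = lines.take e ++ (lines.drop e).takeWhile isTrailer := by
  rw [bExtend_eq, List.take_add]
  congr 1
  exact take_length_takeWhile ..

theorem browseLoop_false_eq_alt (fn : String) (lines : List String) :
    browseLoopA fn lines false = browse_code_bottom_to_top_alt lines fn := by
  induction lines with
  | nil => rfl
  | cons l ls ih =>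
      simp only [browseLoopA, browse_code_bottom_to_top_alt, List.findIdx?_cons]
      by_cases hp : (PySem.Str.isIn fn l && !isCommentLine l) = true
      · rw [if_pos hp]
        simp only [hp, browseLoopA_true, take_bExtend]
        simp
      · rw [if_neg hp]
        simp only [Bool.not_eq_true] at hp
        rw [hp]
        simp only [ih, browse_code_bottom_to_top_alt]
        cases hfi : ls.findIdx? (fun l => PySem.Str.isIn fn l && !isCommentLine l) with
        | none => simp
        | some i =>
            simp only [Option.map_some]
            rw [take_bExtend, take_bExtend]
            have : (l :: ls).drop (i + 1 + 1) = ls.drop (i + 1) := rfl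
            rw [this]
            have : (l :: ls).take (i + 1 + 1) = l :: ls.take (i + 1) := rfl
            rw [this]
            rfl

-- ===== VERDICT (by name: the statement is the Claim_ definition above) =====
theorem browse_code_bottom_to_top_spec : Claim_equal_browse_code_bottom_to_top := by
  intro lines fn _
  unfold Spec_browse_code_bottom_to_top browse_code_bottom_to_top
  exact browseLoop_false_eq_alt fn lines
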